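-- pv_equiv track=rewrite | github.com/xuxiran/translate-staff-to-simple-musical-notation | score_recognition_v4/segmenter.py | whitene
-- ===== SOURCE A (Python) =====
-- def whitene(rle, vals, max_height):
--     rlv = []
--     for length, value in zip(rle, vals):
--         if value == 0 and length < 1.1*max_height:
--             value = 1
--         rlv.append((length, value))
--
--     n_rle, n_vals = [], []
--     count = 0
--     for length, value in rlv:
--         if value == 1:
--             count = count + length
--         else:
--             if count > 0:
--                 n_rle.append(count)
--                 n_vals.append(1)
--
--             count = 0
--             n_rle.append(length)
--             n_vals.append(0)
--     if count > 0:
--         n_rle.append(count)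
--         n_vals.append(1)
--
--     return n_rle, n_vals
-- ===== SOURCE B (Python) =====
-- def whitene(rle, vals, max_height):
--     # Group-scan decomposition: scan runs of "gap" segments in one pass,
--     # summing each run in an inner scan, instead of A's accumulator/flush loop
--     # over a pre-whitened list.
--     def is_gap(l, v):
--         return v == 1 or (v == 0 and l < 1.1 * max_height)
--
--     pairs = list(zip(rle, vals))
--     n = len(pairs)
--     n_rle, n_vals = [], []
--     i = 0
--     while i < n:
--         if is_gap(*pairs[i]):
--             total = 0
--             while i < n and is_gap(*pairs[i]):
--                 total += pairs[i][0]
--                 i += 1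
--             if total > 0:
--                 n_rle.append(total)
--                 n_vals.append(1)
--         else:
--             n_rle.append(pairs[i][0])
--             n_vals.append(0)
--             i += 1
--     return n_rle, n_vals
-- ===== Notes on version B (the rewrite author's own statement) =====
-- stated objective: alternative
-- what changed: B replaces A's whiten-then-accumulate/flush loop (pending-count state carried across iterations plus a trailing flush) by a single group-scan: on meeting a gap segment it sums the whole maximal run of gap segments in an inner scan and emits it at once, so there is no whitened intermediate list, no cross-iteration counter and no post-loop flush.
-- outside the precondition, e.g. on whitene([55], [0], 50): A returns ([55], [1]), B returns ([55], [1])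
import Mathlib
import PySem

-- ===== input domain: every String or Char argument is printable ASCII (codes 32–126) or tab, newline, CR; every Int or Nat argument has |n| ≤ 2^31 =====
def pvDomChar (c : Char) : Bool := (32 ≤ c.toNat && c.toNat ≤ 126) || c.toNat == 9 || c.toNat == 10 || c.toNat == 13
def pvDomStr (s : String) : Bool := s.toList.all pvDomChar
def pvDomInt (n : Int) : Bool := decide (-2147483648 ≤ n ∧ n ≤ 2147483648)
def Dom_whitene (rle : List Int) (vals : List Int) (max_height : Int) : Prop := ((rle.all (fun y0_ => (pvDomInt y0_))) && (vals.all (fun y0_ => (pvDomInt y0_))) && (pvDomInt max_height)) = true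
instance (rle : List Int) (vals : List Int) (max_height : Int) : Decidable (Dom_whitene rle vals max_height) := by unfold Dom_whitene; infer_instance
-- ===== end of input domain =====

-- B replaces A's whiten-then-accumulate/flush loop by a single group-scan that sums each
-- maximal run of gap segments in an inner scan (objective: alternative; same cost).


-- ===== PORT A =====
-- Python's float test `length < 1.1*max_height` is modelled exactly by the rational test
-- `10*length < 11*max_height`; this is exact for all inputs admitted by Pre_whitene below
-- (it can disagree with double rounding only at exact ties 10*length = 11*max_height).
def aWhite (max_height : Int) (p : Int × Int) : Int × Int :=
  (p.1, if p.2 = 0 ∧ 10 * p.1 < 11 * max_height then 1 else p.2)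

def aStep (s : List Int × List Int × Int) (p : Int × Int) : List Int × List Int × Int :=
  if p.2 = 1 then (s.1, s.2.1, s.2.2 + p.1)
  else if s.2.2 > 0 then (s.1 ++ [s.2.2, p.1], s.2.1 ++ [1, 0], 0)
  else (s.1 ++ [p.1], s.2.1 ++ [0], 0)

def whitene (rle : List Int) (vals : List Int) (max_height : Int) : List Int × List Int :=
  let rlv := (List.zip rle vals).foldl (fun acc p => acc ++ [aWhite max_height p]) []
  let s := rlv.foldl aStep ([], [], 0)
  if s.2.2 > 0 then (s.1 ++ [s.2.2], s.2.1 ++ [1]) else (s.1, s.2.1)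

-- ===== PORT B =====
-- same float modelling note as for port A
def bGap (max_height : Int) (p : Int × Int) : Bool :=
  p.2 == 1 || (p.2 == 0 && decide (10 * p.1 < 11 * max_height))

-- the inner `while ... is_gap` scan of Source B: total of the leading gap run, and the rest
def bTake (max_height : Int) : List (Int × Int) → Int × List (Int × Int)
  | [] => (0, [])
  | p :: rest =>
    if bGap max_height p then
      let tr := bTake max_height rest
      (p.1 + tr.1, tr.2)
    else (0, p :: rest)

lemma bTake_len (max_height : Int) : ∀ xs : List (Int × Int),
    (bTake max_height xs).2.length ≤ xs.length := by
  intro xs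
  induction xs with
  | nil => simp [bTake]
  | cons p rest ih =>
    simp only [bTake]
    split
    · exact Nat.le_succ_of_le ih
    · simp

def whitene_altGo (max_height : Int) : List (Int × Int) → List Int × List Int
  | [] => ([], [])
  | p :: rest =>
    if bGap max_height p then
      let t := p.1 + (bTake max_height rest).1
      let r := (bTake max_height rest).2
      let s := whitene_altGo max_height r
      if t > 0 then (t :: s.1, 1 :: s.2) else s
    else
      let s := whitene_altGo max_height rest
      (p.1 :: s.1, 0 :: s.2)
termination_by xs => xs.length
decreasing_by
  · exact Nat.lt_succ_of_le (bTake_len max_height rest)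
  · simp

def whitene_alt (rle : List Int) (vals : List Int) (max_height : Int) : List Int × List Int :=
  whitene_altGo max_height (List.zip rle vals)

-- ===== PRECONDITION & SPEC =====
-- Pre_ excludes inputs where some paired (length, 0) segment has 10*length exactly equal to
-- 11*max_height (max_height ≠ 0): there the Python test `length < 1.1*max_height` depends on
-- IEEE double rounding, which the exact integer model of both ports cannot capture.
def Pre_whitene (rle : List Int) (vals : List Int) (max_height : Int) : Prop :=
  ∀ p ∈ List.zip rle vals, ¬ (p.2 = 0 ∧ 10 * p.1 = 11 * max_height ∧ max_height ≠ 0)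
instance (rle : List Int) (vals : List Int) (max_height : Int) : Decidable (Pre_whitene rle vals max_height) := by unfold Pre_whitene; infer_instance

def pvWitness_whitene : List Int × List Int × Int := ([3, 1, 4], [0, 1, 2], 10)

def Spec_whitene (rle : List Int) (vals : List Int) (max_height : Int) (out : List Int × List Int) : Prop := out = whitene_alt rle vals max_height
instance (rle : List Int) (vals : List Int) (max_height : Int) (out : List Int × List Int) : Decidable (Spec_whitene rle vals max_height out) := by unfold Spec_whitene; infer_instance

-- ===== CLAIM (what is proved, stated in full; the proofs are below) =====
def Claim_equal_whitene : Prop := ∀ (rle : List Int) (vals : List Int) (max_height : Int), Dom_whitene rle vals max_height → Pre_whitene rle vals max_height → Spec_whitene rle vals max_height (whitene rle vals max_height)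

-- ===== LEMMAS AND PROOFS =====

-- A's accumulator loop, with a pending gap count c, as a structural recursion
def goC (max_height : Int) (c : Int) : List (Int × Int) → List Int × List Int
  | [] => if c > 0 then ([c], [1]) else ([], [])
  | p :: rest =>
    if bGap max_height p then goC max_height (c + p.1) rest
    else if c > 0 then
      let s := goC max_height 0 rest
      (c :: p.1 :: s.1, 1 :: 0 :: s.2)
    else
      let s := goC max_height 0 rest
      (p.1 :: s.1, 0 :: s.2)

lemma aWhite_snd_eq_one (max_height : Int) (p : Int × Int) :
    ((aWhite max_height p).2 = 1) ↔ bGap max_height p = true := by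
  rcases p with ⟨l, v⟩
  simp only [aWhite, bGap]
  split_ifs with h
  · simp [h.1, h.2]
  · constructor
    · intro hv; simp [hv]
    · intro hb
      simp only [Bool.or_eq_true, Bool.and_eq_true, beq_iff_eq, decide_eq_true_eq] at hb
      rcases hb with hb | hb
      · exact hb
      · exact absurd ⟨hb.1, hb.2⟩ h

lemma foldl_snoc (max_height : Int) :
    ∀ (xs : List (Int × Int)) (init : List (Int × Int)),
      xs.foldl (fun acc p => acc ++ [aWhite max_height p]) init
        = init ++ xs.map (aWhite max_height) := by
  intro xs
  induction xs with
  | nil => simp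
  | cons p rest ih => intro init; simp [List.foldl, ih]

lemma foldl_aStep (max_height : Int) :
    ∀ (xs : List (Int × Int)) (nr nv : List Int) (c : Int),
      (let s := (xs.map (aWhite max_height)).foldl aStep (nr, nv, c)
       if s.2.2 > 0 then (s.1 ++ [s.2.2], s.2.1 ++ [1]) else (s.1, s.2.1))
        = (nr ++ (goC max_height c xs).1, nv ++ (goC max_height c xs).2) := by
  intro xs
  induction xs with
  | nil =>
    intro nr nv c
    simp only [List.map, List.foldl, goC]
    split_ifs with h <;> simp
  | cons p rest ih =>
    intro nr nv c
    by_cases hb : bGap max_height p = true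
    · have h1 : (aWhite max_height p).2 = 1 := (aWhite_snd_eq_one max_height p).mpr hb
      simp only [List.map, List.foldl, aStep, h1, goC, hb, if_true]
      exact ih nr nv (c + p.1)
    · have h1 : ¬ (aWhite max_height p).2 = 1 := by
        intro h; exact hb ((aWhite_snd_eq_one max_height p).mp h)
      have hfst : (aWhite max_height p).1 = p.1 := rfl
      simp only [List.map, List.foldl, aStep, if_neg h1, goC, hb, if_false, Bool.false_eq_true]
      by_cases hc : c > 0
      · simp only [if_pos hc, hfst]
        rw [ih]
        simp
      · simp only [if_neg hc, hfst]
        rw [ih]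
        simp

lemma goC_bTake (max_height : Int) :
    ∀ (xs : List (Int × Int)) (c : Int),
      goC max_height c xs =
        (if c + (bTake max_height xs).1 > 0 then
          ((c + (bTake max_height xs).1) :: (goC max_height 0 (bTake max_height xs).2).1,
            1 :: (goC max_height 0 (bTake max_height xs).2).2)
        else goC max_height 0 (bTake max_height xs).2) := by
  intro xs
  induction xs with
  | nil => intro c; simp only [bTake, goC]; split_ifs with h <;> simp_all <;> omega
  | cons p rest ih =>
    intro c
    by_cases hb : bGap max_height p = true
    · simp only [goC, hb, if_true, bTake]
      rw [ih (c + p.1)]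
      have : c + p.1 + (bTake max_height rest).1 = c + (p.1 + (bTake max_height rest).1) := by ring
      rw [this]
    · simp only [goC, hb, if_false, Bool.false_eq_true, bTake]
      by_cases hc : c > 0
      · have hc' : c + 0 > 0 := by omega
        simp [hc]
      · have hc' : ¬ c + 0 > 0 := by omega
        simp [hc]

lemma altGo_eq_goC (max_height : Int) :
    ∀ (n : Nat) (xs : List (Int × Int)), xs.length ≤ n →
      whitene_altGo max_height xs = goC max_height 0 xs := by
  intro n
  induction n with
  | zero =>
    intro xs h
    have : xs = [] := List.eq_nil_of_length_eq_zero (Nat.le_zero.mp h)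
    subst this; simp [whitene_altGo, goC]
  | succ n ih =>
    intro xs h
    cases xs with
    | nil => simp [whitene_altGo, goC]
    | cons p rest =>
      by_cases hb : bGap max_height p = true
      · have hlen : (bTake max_height rest).2.length ≤ n := by
          have := bTake_len max_height rest
          simp only [List.length_cons, Nat.succ_le_succ_iff] at h
          omega
        rw [whitene_altGo, goC_bTake max_height (p :: rest) 0]
        simp only [hb, if_true, bTake]
        rw [ih _ hlen]
        have : (0 : Int) + (p.1 + (bTake max_height rest).1) = p.1 + (bTake max_height rest).1 := by ring
        rw [this]
      · have hlen : rest.length ≤ n := by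
          simp only [List.length_cons, Nat.succ_le_succ_iff] at h; exact h
        rw [whitene_altGo]
        simp only [hb, if_false, Bool.false_eq_true, goC]
        rw [ih _ hlen]
        simp

lemma whitene_eq (rle vals : List Int) (max_height : Int) :
    whitene rle vals max_height = whitene_alt rle vals max_height := by
  unfold whitene whitene_alt
  rw [foldl_snoc, List.nil_append, foldl_aStep,
    altGo_eq_goC max_height (List.zip rle vals).length _ (le_refl _)]
  simp

-- ===== VERDICT (by name: the statement is the Claim_ definition above) =====
theorem whitene_spec : Claim_equal_whitene := by
  intro rle vals max_height _ _
  unfold Spec_whitene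
  exact whitene_eq rle vals max_height
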